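-- pv_equiv track=rewrite | github.com/teloryfrozy/Vinted-API-RevEng | program/vinted_api.py | get_first_month_trimester
-- ===== SOURCE A (Python) =====
-- def get_first_month_trimester(num_trim:int) -> int:
--     """Returns the first month of the trimester according to its number"""
--     # (number of the trimester, first month of the previous trimester)
--     trimesters = (
--         (1, 1),
--         (2, 4),
--         (3, 7),
--         (4, 10)
--     )
--
--     for i in range(4):
--         if trimesters[i][0] == num_trim:
--             return trimesters[i][1]
-- ===== SOURCE B (Python) =====
-- def get_first_month_trimester(num_trim: int) -> int:
--     """Returns the first month of the trimester according to its number"""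
--     if 1 <= num_trim <= 4:
--         return 3 * num_trim - 2
--     return None
-- ===== Notes on version B (the rewrite author's own statement) =====
-- stated objective: simpler
-- what changed: Replaces the table scan over a tuple of (trimester, first month) pairs with a range check and the closed-form formula 3*num_trim - 2.
import Mathlib
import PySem

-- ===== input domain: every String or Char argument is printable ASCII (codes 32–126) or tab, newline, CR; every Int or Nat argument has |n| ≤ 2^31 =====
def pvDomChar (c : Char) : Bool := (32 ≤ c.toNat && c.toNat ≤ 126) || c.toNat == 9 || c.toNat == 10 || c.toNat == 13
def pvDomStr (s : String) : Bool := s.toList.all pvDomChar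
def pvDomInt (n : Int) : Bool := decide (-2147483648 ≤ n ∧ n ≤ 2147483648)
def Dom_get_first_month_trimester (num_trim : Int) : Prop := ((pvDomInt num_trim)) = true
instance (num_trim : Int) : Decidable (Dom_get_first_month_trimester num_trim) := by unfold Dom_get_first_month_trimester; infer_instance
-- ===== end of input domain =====

-- B replaces A's table scan with a range check and the closed-form 3*num_trim - 2 (objective: simpler).

-- ===== PORT A =====
-- the tuple of (trimester number, first month) pairs
def gfmtTrimesters : List (Int × Int) := [(1, 1), (2, 4), (3, 7), (4, 10)]

-- scan i = 0..3; return the month of the first matching entry, else fall off → none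
def gfmtLoop (num_trim : Int) : List Nat → Option Int
  | [] => none
  | i :: rest =>
    match (PySem.List.pyGet? gfmtTrimesters (Int.ofNat i)) with
    | some (t, m) => if t == num_trim then some m else gfmtLoop num_trim rest
    | none => none

def get_first_month_trimester (num_trim : Int) : Option Int :=
  gfmtLoop num_trim [0, 1, 2, 3]

-- ===== PORT B =====
def get_first_month_trimester_alt (num_trim : Int) : Option Int :=
  if 1 ≤ num_trim ∧ num_trim ≤ 4 then some (3 * num_trim - 2) else none

-- ===== PRECONDITION & SPEC =====
def Spec_get_first_month_trimester (num_trim : Int) (out : Option Int) : Prop := out = get_first_month_trimester_alt num_trim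
instance (num_trim : Int) (out : Option Int) : Decidable (Spec_get_first_month_trimester num_trim out) := by unfold Spec_get_first_month_trimester; infer_instance

-- ===== CLAIM (what is proved, stated in full; the proofs are below) =====
def Claim_equal_get_first_month_trimester : Prop := ∀ (num_trim : Int), Dom_get_first_month_trimester num_trim → Spec_get_first_month_trimester num_trim (get_first_month_trimester num_trim)

-- ===== LEMMAS AND PROOFS =====

-- ===== VERDICT (by name: the statement is the Claim_ definition above) =====
theorem get_first_month_trimester_spec : Claim_equal_get_first_month_trimester := by
  intro n _
  show get_first_month_trimester n = get_first_month_trimester_alt n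
  by_cases h1 : n = 1
  · subst h1; decide
  by_cases h2 : n = 2
  · subst h2; decide
  by_cases h3 : n = 3
  · subst h3; decide
  by_cases h4 : n = 4
  · subst h4; decide
  have h : ¬ (1 ≤ n ∧ n ≤ 4) := by omega
  have e1 : ¬ ((1 : Int) = n) := by omega
  have e2 : ¬ ((2 : Int) = n) := by omega
  have e3 : ¬ ((3 : Int) = n) := by omega
  have e4 : ¬ ((4 : Int) = n) := by omega
  simp [get_first_month_trimester, get_first_month_trimester_alt, gfmtLoop, gfmtTrimesters,
    PySem.List.pyGet?, PySem.List.pyIdx?, e1, e2, e3, e4, h]
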